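-- pv_equiv track=rewrite | github.com/sorgerlab/indra | indra/sources/bbn/visualize_causal.py | shorter_name
-- ===== SOURCE A (Python) =====
-- def shorter_name(key):
--     """Return a shorter name for an id.
--
--     Does this by only taking the last part of the URI,
--     after the last / and the last #. Also replaces - and . with _.
--
--     Parameters
--     ----------
--     key: str
--         Some URI
--
--     Returns
--     -------
--     key_short: str
--         A shortened, but more ambiguous, identifier
--     """
--     key_short = key
--     for sep in ['#', '/']:
--         ind = key_short.rfind(sep)
--         if ind is not None:
--             key_short = key_short[ind+1:]
--         else:
--             key_short = key_short
--     return key_short.replace('-', '_').replace('.', '_')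
-- ===== SOURCE B (Python) =====
-- def shorter_name(key):
--     """Return a shorter name for an id: the part of the URI after the last
--     '#' or '/', with '-' and '.' replaced by '_'."""
--     core = key.replace('#', '/').split('/')[-1]
--     return core.replace('-', '_').replace('.', '_')
-- ===== Notes on version B (the rewrite author's own statement) =====
-- stated objective: simpler
-- what changed: B normalises '#' to '/', tokenizes once with split and takes the last token, instead of A's loop of successive rfind-and-slice cuts per separator.
import Mathlib
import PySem

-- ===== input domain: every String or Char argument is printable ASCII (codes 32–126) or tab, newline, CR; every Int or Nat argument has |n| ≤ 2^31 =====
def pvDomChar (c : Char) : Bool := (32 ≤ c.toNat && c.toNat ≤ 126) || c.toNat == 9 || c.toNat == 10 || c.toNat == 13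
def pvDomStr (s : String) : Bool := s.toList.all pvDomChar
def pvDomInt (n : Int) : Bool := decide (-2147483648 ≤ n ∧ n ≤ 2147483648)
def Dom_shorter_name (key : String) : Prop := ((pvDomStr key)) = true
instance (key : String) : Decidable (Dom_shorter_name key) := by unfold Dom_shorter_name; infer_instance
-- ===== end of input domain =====

-- B tokenizes once (normalise '#' to '/', split on '/', take the last token) instead of A's successive rfind/slice cuts: a simpler decomposition with the same result.

-- ===== PORT A =====
def shorter_name (key : String) : String :=
  let key_short := key
  -- for sep in ['#', '/']: ind = key_short.rfind(sep); key_short = key_short[ind+1:]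
  -- (Python's rfind returns an int, never None, so A's 'if ind is not None' branch is always taken)
  let key_short := (["#", "/"] : List String).foldl
    (fun key_short sep =>
      let ind := PySem.Str.rfind key_short sep
      PySem.Str.slice key_short (some (ind + 1)) none) key_short
  PySem.Str.replace (PySem.Str.replace key_short "-" "_") "." "_"

-- ===== PORT B =====
def shorter_name_alt (key : String) : String :=
  -- core = key.replace('#', '/').split('/')[-1]  (split with a nonempty separator never
  -- returns an empty list, so the .getD defaults below are never taken: totality guards only)
  let parts := (PySem.Str.split? (PySem.Str.replace key "#" "/") "/").getD []
  let core := (PySem.List.pyGet? parts (-1)).getD ""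
  PySem.Str.replace (PySem.Str.replace core "-" "_") "." "_"

-- ===== PRECONDITION & SPEC =====
def Spec_shorter_name (key : String) (out : String) : Prop := out = shorter_name_alt key
instance (key : String) (out : String) : Decidable (Spec_shorter_name key out) := by unfold Spec_shorter_name; infer_instance

-- ===== CLAIM (what is proved, stated in full; the proofs are below) =====
def Claim_equal_shorter_name : Prop := ∀ (key : String), Dom_shorter_name key → Spec_shorter_name key (shorter_name key)

-- ===== LEMMAS AND PROOFS =====

def afterLastP (p : Char → Bool) (s : List Char) : List Char :=
  (s.reverse.takeWhile p).reverse

theorem prefix_single (c : Char) (l : List Char) :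
    [c].isPrefixOf l = true ↔ l.head? = some c := by
  cases l with
  | nil => simp [List.isPrefixOf]
  | cons h t =>
    rw [List.isPrefixOf_cons₂]
    simp only [List.isPrefixOf_nil_left, Bool.and_true, beq_iff_eq, List.head?_cons,
      Option.some.injEq]
    exact eq_comm

theorem prefix_drop (c : Char) (s : List Char) (i : Nat) :
    [c].isPrefixOf (s.drop i) = true ↔ s[i]? = some c := by
  rw [prefix_single, List.head?_drop]

-- rfind.go equations
theorem rfind_go_zero (s sub : List Char) :
    PySem.Chars.rfind.go s sub 0 = if sub.isPrefixOf s then 0 else -1 := by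
  rw [PySem.Chars.rfind.go]

theorem rfind_go_succ (s sub : List Char) (j : Nat) :
    PySem.Chars.rfind.go s sub (j+1)
      = if sub.isPrefixOf (s.drop (j+1)) then ((j+1 : Nat) : Int)
        else PySem.Chars.rfind.go s sub j := by
  rw [PySem.Chars.rfind.go]

theorem rfind_go_none (s : List Char) (c : Char) (j : Nat)
    (h : ∀ i, i ≤ j → s[i]? ≠ some c) : PySem.Chars.rfind.go s [c] j = -1 := by
  induction j with
  | zero =>
    rw [rfind_go_zero]
    have : ¬ ([c].isPrefixOf s = true) := by
      rw [show s = s.drop 0 by simp, prefix_drop]; exact h 0 le_rfl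
    simp [this]
  | succ j ih =>
    rw [rfind_go_succ]
    have : ¬ ([c].isPrefixOf (s.drop (j+1)) = true) := by
      rw [prefix_drop]; exact h (j+1) le_rfl
    simp only [this]
    exact ih (fun i hi => h i (Nat.le_succ_of_le hi))

theorem rfind_go_found (s : List Char) (c : Char) (j i : Nat) (hi : i ≤ j)
    (hsc : s[i]? = some c) (hmax : ∀ i', i < i' → i' ≤ j → s[i']? ≠ some c) :
    PySem.Chars.rfind.go s [c] j = (i : Int) := by
  induction j with
  | zero =>
    interval_cases i
    rw [rfind_go_zero]
    have : [c].isPrefixOf s = true := by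
      rw [show s = s.drop 0 by simp, prefix_drop]; exact hsc
    simp [this]
  | succ j ih =>
    rw [rfind_go_succ]
    rcases Nat.lt_or_ge i (j+1) with h1 | h1
    · have : ¬ ([c].isPrefixOf (s.drop (j+1)) = true) := by
        rw [prefix_drop]; exact hmax (j+1) h1 le_rfl
      simp only [this]
      exact ih (Nat.lt_succ_iff.mp h1) (fun i' hlt hle => hmax i' hlt (Nat.le_succ_of_le hle))
    · have hij : i = j+1 := le_antisymm hi h1
      subst hij
      have : [c].isPrefixOf (s.drop (j+1)) = true := by rw [prefix_drop]; exact hsc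
      simp [this]

theorem afterLastP_of_all (p : Char → Bool) (s : List Char) (h : ∀ x ∈ s, p x = true) :
    afterLastP p s = s := by
  unfold afterLastP
  rw [List.takeWhile_eq_self_iff.mpr (by simpa using h), List.reverse_reverse]

theorem afterLastP_append (p : Char → Bool) (t u : List Char) (c : Char)
    (hc : p c = false) (hu : ∀ x ∈ u, p x = true) :
    afterLastP p (t ++ c :: u) = u := by
  unfold afterLastP
  rw [show (t ++ c :: u).reverse = u.reverse ++ c :: t.reverse by simp]
  rw [List.takeWhile_append]
  rw [List.takeWhile_eq_self_iff.mpr (by simpa using hu)]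
  simp [hc]

theorem exists_decomp (p : Char → Bool) (s : List Char) (h : ¬ ∀ x ∈ s, p x = true) :
    ∃ t c u, s = t ++ c :: u ∧ p c = false ∧ ∀ x ∈ u, p x = true := by
  have hne : List.dropWhile p s.reverse ≠ [] := by
    intro hnil
    exact h (fun x hx => List.dropWhile_eq_nil_iff.mp hnil x (by simpa using hx))
  obtain ⟨c, d', hcons⟩ := List.exists_cons_of_ne_nil hne
  have hpc : p c = false := by
    have hh := List.head_dropWhile_not p (l := s.reverse) hne
    simp only [hcons, List.head_cons] at hh
    exact hh
  refine ⟨d'.reverse, c, (s.reverse.takeWhile p).reverse, ?_, hpc, ?_⟩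
  · have hsplit : s.reverse.takeWhile p ++ List.dropWhile p s.reverse = s.reverse :=
      List.takeWhile_append_dropWhile
    have hs : s = (List.dropWhile p s.reverse).reverse ++ (s.reverse.takeWhile p).reverse := by
      have h2 := congrArg List.reverse hsplit
      rw [List.reverse_append, List.reverse_reverse] at h2
      exact h2.symm
    exact hs.trans (by rw [hcons]; simp)
  · intro x hx
    exact List.mem_takeWhile_imp (by simpa using hx)

theorem clampIdx_ofNat (n k : Nat) : PySem.List.clampIdx n (k : Int) = min k n := by
  simp [PySem.List.clampIdx]

theorem cutA (s : List Char) (c : Char) :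
    PySem.Chars.slice s (some (PySem.Chars.rfind s [c] + 1)) none
      = afterLastP (fun x => x != c) s := by
  by_cases hall : ∀ x ∈ s, (x != c) = true
  · have hrf : PySem.Chars.rfind s [c] = -1 := by
      apply rfind_go_none
      intro i _ hic
      have hmem : c ∈ s := List.mem_of_getElem? hic
      simpa using hall c hmem
    rw [hrf, afterLastP_of_all _ _ hall]
    simp [PySem.Chars.slice, PySem.List.slice, PySem.List.clampIdx]
  · obtain ⟨t, c', u, hs, hc', hu⟩ := exists_decomp _ s hall
    have hcc : c' = c := by simpa using hc'
    subst hcc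
    subst hs
    have hget : (t ++ c' :: u)[t.length]? = some c' := by
      rw [List.getElem?_append_right le_rfl]
      simp
    have hrf : PySem.Chars.rfind (t ++ c' :: u) [c'] = (t.length : Int) := by
      apply rfind_go_found _ _ _ _ (by simp) hget
      intro i' hlt _ heq
      rw [List.getElem?_append_right (Nat.le_of_lt hlt)] at heq
      rw [show i' - t.length = (i' - t.length - 1) + 1 by omega] at heq
      simp only [List.getElem?_cons_succ] at heq
      have hmem : c' ∈ u := List.mem_of_getElem? heq
      simpa using hu c' hmem
    rw [hrf]
    rw [afterLastP_append (fun x => x != c') t u c' hc' hu]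
    have hlen : (t ++ c' :: u).length = t.length + 1 + u.length := by simp; omega
    simp only [PySem.Chars.slice, PySem.List.slice]
    rw [show ((t.length : Int) + 1) = ((t.length + 1 : Nat) : Int) by push_cast; ring]
    rw [clampIdx_ofNat]
    rw [hlen, show min (t.length + 1) (t.length + 1 + u.length) = t.length + 1 by omega]
    rw [show t ++ c' :: u = (t ++ [c']) ++ u by simp]
    rw [show t.length + 1 = (t ++ [c']).length by simp]
    rw [List.drop_left]
    rw [show (t ++ [c']).length + u.length - (t ++ [c']).length = u.length by omega]
    exact List.take_length

-- splitOn.go equations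
theorem split_go_nil (sep : List Char) (f : Nat) (cur acc) :
    PySem.Chars.splitOn.go sep (f+1) [] cur acc = (cur.reverse :: acc).reverse := by
  rw [PySem.Chars.splitOn.go]
  omega

theorem split_go_cons (sep : List Char) (f : Nat) (c : Char) (rest cur acc) :
    PySem.Chars.splitOn.go sep (f+1) (c :: rest) cur acc
      = if sep.isPrefixOf (c :: rest)
          then PySem.Chars.splitOn.go sep f ((c :: rest).drop sep.length) [] (cur.reverse :: acc)
          else PySem.Chars.splitOn.go sep f rest (c :: cur) acc := by
  rw [PySem.Chars.splitOn.go]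

theorem afterLastP_cons_mem (c x : Char) (rest : List Char) (h : c ∈ rest) :
    afterLastP (fun y => y != c) (x :: rest) = afterLastP (fun y => y != c) rest := by
  unfold afterLastP
  rw [List.reverse_cons, List.takeWhile_append]
  have hne : ¬ ((rest.reverse.takeWhile (fun y => y != c)).length = rest.reverse.length) := by
    intro hlen
    have hpfx := List.takeWhile_prefix (l := rest.reverse) (fun y => y != c)
    have heq := List.IsPrefix.eq_of_length hpfx hlen
    have := List.takeWhile_eq_self_iff.mp heq c (by simpa using h)
    simp at this
  rw [if_neg hne]

theorem afterLastP_cons_self (c : Char) (rest : List Char) (h : c ∉ rest) :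
    afterLastP (fun y => y != c) (c :: rest) = rest := by
  have := afterLastP_append (fun y => y != c) [] rest c (by simp)
    (fun x hx => by simp only [bne_iff_ne, ne_eq]; rintro rfl; exact h hx)
  simpa using this

theorem split_go_last (c : Char) (fuel : Nat) :
    ∀ (l cur : List Char) (accl : List (List Char)), l.length < fuel →
      (PySem.Chars.splitOn.go [c] fuel l cur accl).getLast?
        = some (if c ∈ l then afterLastP (fun y => y != c) l else cur.reverse ++ l) := by
  induction fuel with
  | zero => intro l cur accl h; omega
  | succ f ih =>
    intro l cur accl h
    cases l with
    | nil =>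
      rw [split_go_nil]
      simp
    | cons x rest =>
      rw [split_go_cons]
      by_cases hx : x = c
      · rw [hx]
        rw [if_pos (by rw [prefix_single]; simp)]
        simp only [List.length_cons, List.length_nil, List.drop_succ_cons, List.drop_zero]
        rw [ih rest [] _ (by simpa using Nat.lt_of_succ_lt_succ h)]
        by_cases hr : c ∈ rest
        · rw [if_pos hr, if_pos (by simp), afterLastP_cons_mem c c rest hr]
        · rw [if_neg hr, if_pos (by simp), afterLastP_cons_self c rest hr]
          simp
      · rw [if_neg (by rw [prefix_single]; simpa using hx)]
        rw [ih rest (x :: cur) _ (by simpa using Nat.lt_of_succ_lt_succ h)]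
        by_cases hr : c ∈ rest
        · rw [if_pos hr, if_pos (by simp [hr]), afterLastP_cons_mem c x rest hr]
        · rw [if_neg hr, if_neg (by simp [hr]; exact fun he => hx he.symm)]
          simp

theorem splitOn_last (s : List Char) (c : Char) :
    (PySem.Chars.splitOn s [c]).getLast? = some (afterLastP (fun y => y != c) s) := by
  rw [PySem.Chars.splitOn, split_go_last c (s.length + 1) s [] [] (by omega)]
  by_cases hc : c ∈ s
  · rw [if_pos hc]
  · rw [if_neg hc, afterLastP_of_all]
    · simp
    · intro x hx
      simp only [bne_iff_ne, ne_eq]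
      rintro rfl; exact hc hx

-- replace.go equations
theorem repl_go_zero (old new l acc) :
    PySem.Chars.replace.go old new 0 l acc = acc.reverse ++ l := by
  rw [PySem.Chars.replace.go]

theorem repl_go_nil (old new : List Char) (f : Nat) (acc) :
    PySem.Chars.replace.go old new (f+1) [] acc = acc.reverse := by
  rw [PySem.Chars.replace.go]
  omega

theorem repl_go_cons (old new : List Char) (f : Nat) (x : Char) (t acc) :
    PySem.Chars.replace.go old new (f+1) (x :: t) acc
      = if old.isPrefixOf (x :: t)
          then PySem.Chars.replace.go old new f ((x :: t).drop old.length) (new.reverse ++ acc)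
          else PySem.Chars.replace.go old new f t (x :: acc) := by
  rw [PySem.Chars.replace.go]

theorem repl_go_single (c d : Char) (fuel : Nat) :
    ∀ (l acc : List Char), l.length ≤ fuel →
      PySem.Chars.replace.go [c] [d] fuel l acc
        = acc.reverse ++ l.map (fun x => if x = c then d else x) := by
  induction fuel with
  | zero =>
    intro l acc h
    rw [Nat.le_zero, List.length_eq_zero_iff] at h
    subst h
    rw [repl_go_zero]
    simp
  | succ f ih =>
    intro l acc h
    cases l with
    | nil => rw [repl_go_nil]; simp
    | cons x t =>
      rw [repl_go_cons]
      by_cases hx : x = c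
      · rw [hx, if_pos (by rw [prefix_single]; simp)]
        simp only [List.length_cons, List.length_nil, List.drop_succ_cons, List.drop_zero]
        rw [ih t _ (by simpa using Nat.le_of_succ_le_succ h)]
        simp
      · rw [if_neg (by rw [prefix_single]; simpa using hx)]
        rw [ih t _ (by simpa using Nat.le_of_succ_le_succ h)]
        simp [hx]

theorem replace_single (s : List Char) (c d : Char) :
    PySem.Chars.replace s [c] [d] = s.map (fun x => if x = c then d else x) := by
  rw [PySem.Chars.replace]
  rw [if_neg (by simp)]
  rw [repl_go_single c d s.length s [] le_rfl]
  simp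

theorem takeWhile_map_core (l : List Char) :
    (l.takeWhile (fun y => y != '#')).takeWhile (fun y => y != '/')
      = (l.map (fun x => if x = '#' then '/' else x)).takeWhile (fun y => y != '/') := by
  induction l with
  | nil => simp
  | cons x t ih =>
    by_cases h1 : x = '#'
    · subst h1
      simp
    · by_cases h2 : x = '/'
      · subst h2
        simp [h1]
      · simp [h1, h2, ih]

theorem main_core (s : List Char) :
    afterLastP (fun y => y != '/') (afterLastP (fun y => y != '#') s)
      = afterLastP (fun y => y != '/') (s.map (fun x => if x = '#' then '/' else x)) := by
  unfold afterLastP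
  rw [List.reverse_reverse]
  rw [show (List.map (fun x => if x = '#' then '/' else x) s).reverse
        = s.reverse.map (fun x => if x = '#' then '/' else x) by rw [List.map_reverse]]
  rw [takeWhile_map_core]

theorem pyGet_neg_one {α : Type} (xs : List α) : PySem.List.pyGet? xs (-1) = xs.getLast? := by
  cases xs with
  | nil => simp [PySem.List.pyGet?, PySem.List.pyIdx?]
  | cons x t =>
    simp only [PySem.List.pyGet?, PySem.List.pyIdx?]
    rw [if_neg (by omega), if_pos (by simp)]
    simp [List.getLast?_eq_getElem?]

theorem shorter_name_eq_alt (key : String) : shorter_name key = shorter_name_alt key := by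
  unfold shorter_name shorter_name_alt
  simp only [List.foldl_cons, List.foldl_nil]
  have hA : (PySem.Str.slice
      (PySem.Str.slice key (some (PySem.Str.rfind key "#" + 1)) none)
      (some (PySem.Str.rfind (PySem.Str.slice key (some (PySem.Str.rfind key "#" + 1)) none) "/" + 1)) none).toList
      = afterLastP (fun y => y != '/') (afterLastP (fun y => y != '#') key.toList) := by
    simp only [PySem.Str.toList_slice, PySem.Str.rfind_eq,
      show ("#" : String).toList = ['#'] from rfl, show ("/" : String).toList = ['/'] from rfl]
    simp only [cutA]
  have hB : ((PySem.List.pyGet? ((PySem.Str.split? (PySem.Str.replace key "#" "/") "/").getD []) (-1)).getD "").toList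
      = afterLastP (fun y => y != '/') (afterLastP (fun y => y != '#') key.toList) := by
    rw [PySem.Str.split?]
    rw [show (PySem.Str.replace key "#" "/").toList
          = key.toList.map (fun x => if x = '#' then '/' else x) by
      rw [PySem.Str.toList_replace]
      rw [show ("#" : String).toList = ['#'] from rfl, show ("/" : String).toList = ['/'] from rfl]
      exact replace_single _ _ _]
    rw [show ("/" : String).toList = ['/'] from rfl]
    rw [PySem.Chars.split?]
    rw [if_neg (by simp)]
    simp only [Option.map_some, Option.getD_some]
    rw [pyGet_neg_one, List.getLast?_map, splitOn_last]
    simp only [Option.map_some, Option.getD_some, String.toList_ofList]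
    exact (main_core key.toList).symm
  rw [String.toList_inj.mp (hA.trans hB.symm)]

-- ===== VERDICT (by name: the statement is the Claim_ definition above) =====
theorem shorter_name_spec : Claim_equal_shorter_name := by
  intro key _
  unfold Spec_shorter_name
  exact shorter_name_eq_alt key
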